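-- pv_equiv track=rewrite | github.com/zyz135/CS2-AI-Caster | slime_fusion.py | solve_slime_fusion
-- ===== SOURCE A (Python) =====
-- def solve_slime_fusion(N, heads):
--     """
--     史莱姆大融合问题
--     使用区间DP解决环形问题
--
--     参数:
--         N: 史莱姆的数量
--         heads: 每个史莱姆的头围列表
--
--     返回:
--         最大总经验值
--     """
--     # 构建完整的数组（处理环形）
--     # 对于环形问题，我们可以将数组复制一份，然后取长度为N的区间
--     extended_heads = heads + heads
--
--     # dp[i][j] 表示从位置i到位置j（包含）的史莱姆融合后的最大经验值
--     # 同时记录融合后的头围和尾围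
--     # 由于是环形，我们需要考虑所有可能的起始位置
--
--     max_experience = 0
--
--     # 尝试每个可能的起始位置（因为环形）
--     for start in range(N):
--         # 构建当前区间的头围数组
--         current_heads = extended_heads[start:start+N]
--
--         # dp[i][j] = (max_exp, head, tail)
--         # 表示从i到j的史莱姆融合后的最大经验值，以及融合后的头围和尾围
--         dp = [[(0, 0, 0) for _ in range(N)] for _ in range(N)]
--
--         # 初始化：单个史莱姆
--         for i in range(N):
--             head = current_heads[i]
--             # 尾围是下一个史莱姆的头围（环形）
--             tail = current_heads[(i + 1) % N]
--             dp[i][i] = (0, head, tail)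
--
--         # 区间长度从2到N
--         for length in range(2, N + 1):
--             for i in range(N - length + 1):
--                 j = i + length - 1
--                 max_exp = 0
--                 best_head = 0
--                 best_tail = 0
--
--                 # 尝试所有分割点k，将区间[i,j]分割为[i,k]和[k+1,j]
--                 for k in range(i, j):
--                     # 左半部分：[i, k]
--                     left_exp, left_head, left_tail = dp[i][k]
--                     # 右半部分：[k+1, j]
--                     right_exp, right_head, right_tail = dp[k+1][j]
--
--                     # 检查是否可以融合（左半部分的尾围应该等于右半部分的头围）
--                     if left_tail == right_head:
--                         # 融合后的新史莱姆：(left_head, right_tail)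
--                         # 获得的经验值：left_head * left_tail * right_tail
--                         fusion_exp = left_head * left_tail * right_tail
--                         total_exp = left_exp + right_exp + fusion_exp
--
--                         if total_exp > max_exp:
--                             max_exp = total_exp
--                             best_head = left_head
--                             best_tail = right_tail
--
--                 dp[i][j] = (max_exp, best_head, best_tail)
--
--         # 更新全局最大经验值
--         if dp[0][N-1][0] > max_experience:
--             max_experience = dp[0][N-1][0]
--
--     return max_experience
-- ===== SOURCE B (Python) =====
-- def _best(pairs):
--     """First strictly-greatest fusion candidate among the given (left, right)
--     cell pairs, defaulting to (0, 0, 0)."""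
--     cands = [(le + re + lh * lt * rt, lh, rt)
--              for (le, lh, lt), (re, rh, rt) in pairs if lt == rh]
--     best = (0, 0, 0)
--     for c in cands:
--         if c[0] > best[0]:
--             best = c
--     return best
--
--
-- def solve_slime_fusion(N, heads):
--     """One shared wrap-free interval DP over the doubled array (rows U[i][d]
--     for interval [i, i+d]); per rotation only the column of intervals ending
--     at the window's last slime (the one cell whose tail wraps) is rebuilt,
--     instead of running a full interval DP per rotation."""
--     if N <= 0:
--         return 0
--     ext = heads + heads
--     M = 2 * N - 1
--     # U[i][d] = (exp, head, tail) for the wrap-free interval [i, i+d], d <= N-2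
--     U = [[(0, ext[i], ext[i + 1])] for i in range(M)]
--     for d in range(1, N - 1):
--         for i in range(M - d):
--             U[i].append(_best([(U[i][t], U[i + t + 1][d - 1 - t])
--                                for t in range(d)]))
--     ans = 0
--     for s in range(N):
--         e = s + N - 1
--         # col[q - i] = cell for [q, e], where the tail at e wraps to ext[s]
--         col = [(0, ext[e], ext[s])]
--         for i in range(e - 1, s - 1, -1):
--             col = [_best([(U[i][t], col[t]) for t in range(e - i)])] + col
--         ans = max(ans, col[0][0])
--     return ans
-- ===== Notes on version B (the rewrite author's own statement) =====
-- stated objective: alternative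
-- what changed: One shared wrap-free interval DP table U[i][d] over the doubled array replaces A's N independent full per-rotation interval DPs; each rotation then only rebuilds the single column of intervals ending at the window's last slime (the one cell whose tail wraps), and candidate fusions per cell are gathered by a comprehension and reduced to the first strict maximum.
import Mathlib
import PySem

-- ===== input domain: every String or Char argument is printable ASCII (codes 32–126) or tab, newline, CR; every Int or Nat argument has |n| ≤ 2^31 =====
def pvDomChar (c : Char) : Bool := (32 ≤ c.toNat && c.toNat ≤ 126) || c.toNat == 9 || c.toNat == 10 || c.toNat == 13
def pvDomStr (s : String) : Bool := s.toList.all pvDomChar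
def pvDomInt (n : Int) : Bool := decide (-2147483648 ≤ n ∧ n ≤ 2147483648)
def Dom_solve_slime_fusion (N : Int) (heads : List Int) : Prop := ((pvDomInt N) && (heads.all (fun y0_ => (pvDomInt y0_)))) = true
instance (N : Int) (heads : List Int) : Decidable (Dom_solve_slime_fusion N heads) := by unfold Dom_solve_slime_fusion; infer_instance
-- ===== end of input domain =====

-- B replaces A's N separate per-rotation interval DPs by one shared wrap-free interval DP table
-- over the doubled array plus, per rotation, only the column of intervals ending at the window's
-- last slime (the only cell whose tail wraps): a different algorithm, same exact result.


-- ===== PORT A =====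
-- one step of 'for k in range(i, j)': l = dp[i][k], r = dp[k+1][j]
def fuseVal (l r acc : Int × Int × Int) : Int × Int × Int :=
  if l.2.2 = r.2.1 then
    let te := l.1 + r.1 + l.2.1 * l.2.2 * r.2.2
    if te > acc.1 then (te, l.2.1, r.2.2) else acc
  else acc

def bestSplit (dp : Int → Int → Int × Int × Int) (i j : Int) : Int × Int × Int :=
  (PySem.List.pyRange i j 1).foldl (fun acc k => fuseVal (dp i k) (dp (k+1) j) acc) (0, 0, 0)

-- A's dp table as a store of written cells, newest first (cells are written at most once)
def tblGet (tbl : List ((Int × Int) × (Int × Int × Int))) (i j : Int) : Int × Int × Int :=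
  match tbl with
  | [] => (0, 0, 0)
  | (k, v) :: rest => if k.1 = i ∧ k.2 = j then v else tblGet rest i j

-- diagonal init for i in range(hi+1), then for length in range(2, lenTop):
-- for i in range(hi - length + 2): dp[i][i+length-1] = best split
def buildDP (h t : Int → Int) (hi lenTop : Int) : List ((Int × Int) × (Int × Int × Int)) :=
  let dp1 := (PySem.List.pyRange 0 (hi+1) 1).foldl
      (fun dp i => ((i, i), (0, h i, t i)) :: dp) []
  (PySem.List.pyRange 2 lenTop 1).foldl (fun dp len =>
    (PySem.List.pyRange 0 (hi - len + 2) 1).foldl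
      (fun dp i => ((i, i + len - 1), bestSplit (tblGet dp) i (i + len - 1)) :: dp) dp) dp1

-- port of A: for each start, slice the rotation and run the full interval DP on it
def solve_slime_fusion (N : Int) (heads : List Int) : Int :=
  let ext := heads ++ heads
  (PySem.List.pyRange 0 N 1).foldl (fun maxExp start =>
    let cur := PySem.List.slice ext (some start) (some (start + N))
    let dp := buildDP (fun i => PySem.List.pyGetD cur i 0)
        (fun i => PySem.List.pyGetD cur (PySem.Int.mod (i+1) N) 0) (N - 1) (N + 1)
    let v := (tblGet dp 0 (N-1)).1
    if v > maxExp then v else maxExp) 0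

-- ===== PORT B =====
-- _best(pairs): list comprehension keeping the fusable pairs, then first strict maximum
def pvB_best (pairs : List ((Int × Int × Int) × (Int × Int × Int))) : Int × Int × Int :=
  let cands := pairs.filterMap (fun p =>
    if p.1.2.2 = p.2.2.1 then
      some (p.1.1 + p.2.1 + p.1.2.1 * p.1.2.2 * p.2.2.2, p.1.2.1, p.2.2.2)
    else none)
  cands.foldl (fun b c => if c.1 > b.1 then c else b) (0, 0, 0)

-- U[i][d]: row i of the shared table, offset d (interval [i, i+d])
def pvB_getU (U : List (List (Int × Int × Int))) (i d : Nat) : Int × Int × Int :=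
  (U.getD i []).getD d (0, 0, 0)

-- 'for i in range(M - d): U[i].append(_best(...))' — the appended cell for offset d only reads
-- offsets < d, so updating all rows from the snapshot U computes the same values
def pvB_step (M : Nat) (U : List (List (Int × Int × Int))) (d : Nat) : List (List (Int × Int × Int)) :=
  U.mapIdx (fun i row =>
    if i + d < M then
      row ++ [pvB_best ((List.range d).map (fun t =>
        (pvB_getU U i t, pvB_getU U (i + t + 1) (d - 1 - t))))]
    else row)

-- the window column, prepending one cell per step: after n steps it covers [e-n, e]
def pvB_col (U : List (List (Int × Int × Int))) (e : Nat) (c0 : Int × Int × Int) :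
    Nat → List (Int × Int × Int)
  | 0 => [c0]
  | n+1 =>
    let col := pvB_col U e c0 n
    pvB_best ((List.range (n+1)).map (fun t =>
      (pvB_getU U (e - (n+1)) t, col.getD t (0, 0, 0)))) :: col

-- port of B: shared wrap-free DP over heads+heads, then per rotation only the column of
-- intervals ending at the window's last slime, whose tail wraps to ext[s]
def solve_slime_fusion_alt (N : Int) (heads : List Int) : Int :=
  if N ≤ 0 then 0 else
  let ext := heads ++ heads
  let M := 2 * N.toNat - 1
  let U0 := (List.range M).map (fun i : Nat =>
    [((0 : Int), PySem.List.pyGetD ext (i : Int) 0, PySem.List.pyGetD ext ((i : Int) + 1) 0)])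
  let U := (List.range' 1 (N.toNat - 2)).foldl (pvB_step M) U0
  (List.range N.toNat).foldl (fun ans s =>
    let e := s + N.toNat - 1
    let col := pvB_col U e
      (0, PySem.List.pyGetD ext (e : Int) 0, PySem.List.pyGetD ext (s : Int) 0) (e - s)
    max ans (col.getD 0 (0, 0, 0)).1) 0

-- ===== PRECONDITION & SPEC =====
-- Exactly the inputs on which A returns: for 0 < N and len(heads) < N some window slice is
-- shorter than N slimes and A raises IndexError; for N ≤ 0 A returns 0 without touching heads.
def Pre_solve_slime_fusion (N : Int) (heads : List Int) : Prop :=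
  N ≤ (heads.length : Int) ∨ N ≤ 0
instance (N : Int) (heads : List Int) : Decidable (Pre_solve_slime_fusion N heads) := by
  unfold Pre_solve_slime_fusion; infer_instance

def pvWitness_solve_slime_fusion : Int × List Int := (3, [2, 3, 4])

def Spec_solve_slime_fusion (N : Int) (heads : List Int) (out : Int) : Prop := out = solve_slime_fusion_alt N heads
instance (N : Int) (heads : List Int) (out : Int) : Decidable (Spec_solve_slime_fusion N heads out) := by unfold Spec_solve_slime_fusion; infer_instance

-- ===== CLAIM (what is proved, stated in full; the proofs are below) =====
def Claim_equal_solve_slime_fusion : Prop := ∀ (N : Int) (heads : List Int), Dom_solve_slime_fusion N heads → Pre_solve_slime_fusion N heads → Spec_solve_slime_fusion N heads (solve_slime_fusion N heads)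

-- ===== LEMMAS AND PROOFS =====

-- Recursive characterization of the interval DP: dpF with enough fuel computes dp[i][j].
def dpF (h t : Int → Int) : Nat → Int → Int → Int × Int × Int
  | 0, i, _ => (0, h i, t i)
  | fuel+1, i, j =>
    if i < j then bestSplit (fun i' j' => dpF h t fuel i' j') i j else (0, h i, t i)

def dpSpec (h t : Int → Int) (i j : Int) : Int × Int × Int := dpF h t (j - i).toNat i j

-- bestSplit reads dp only at (i,k) and (k+1,j) for i ≤ k < j
theorem bestSplit_congr (dp dp' : Int → Int → Int × Int × Int) (i j : Int)
    (hc : ∀ k, i ≤ k → k < j → dp i k = dp' i k ∧ dp (k+1) j = dp' (k+1) j) :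
    bestSplit dp i j = bestSplit dp' i j := by
  unfold bestSplit
  refine PySem.List.foldl_congr_mem _ _ _ _ (fun acc k hk => ?_)
  rw [PySem.List.mem_pyRange_one] at hk
  rw [(hc k hk.1 hk.2).1, (hc k hk.1 hk.2).2]

theorem dpF_succ (h t : Int → Int) :
    ∀ fuel (i j : Int), (j - i).toNat ≤ fuel → dpF h t (fuel+1) i j = dpF h t fuel i j := by
  intro fuel
  induction fuel with
  | zero =>
    intro i j hij
    have : ¬ i < j := by omega
    simp [dpF, this]
  | succ f ih =>
    intro i j hij
    by_cases hlt : i < j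
    · simp only [dpF, if_pos hlt]
      exact bestSplit_congr _ _ i j (fun k hk1 hk2 =>
        ⟨ih i k (by omega), ih (k+1) j (by omega)⟩)
    · simp only [dpF, if_neg hlt]

theorem dpF_stable (h t : Int → Int) :
    ∀ g fuel (i j : Int), (j - i).toNat ≤ fuel → fuel ≤ g → dpF h t fuel i j = dpF h t g i j := by
  intro g
  induction g with
  | zero => intro fuel i j _ hg; interval_cases fuel; rfl
  | succ g ih =>
    intro fuel i j hij hg
    rcases Nat.lt_or_ge fuel (g+1) with hf | hf
    · rw [ih fuel i j hij (by omega)]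
      exact (dpF_succ h t g i j (by omega)).symm
    · have : fuel = g + 1 := by omega
      subst this; rfl

theorem dpSpec_diag (h t : Int → Int) (i : Int) : dpSpec h t i i = (0, h i, t i) := by
  simp [dpSpec, dpF]

-- the diagonal init fold of A
theorem initFold_eq (h t : Int → Int) :
    ∀ (a b : Int) (dp0 : List ((Int × Int) × (Int × Int × Int))) (i' j' : Int),
    tblGet ((PySem.List.pyRange a b 1).foldl (fun dp i => ((i, i), (0, h i, t i)) :: dp) dp0) i' j'
      = if a ≤ i' ∧ i' < b ∧ j' = i' then (0, h i', t i') else tblGet dp0 i' j' := by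
  intro a b
  generalize hfuel : (b - a).toNat = n
  induction n generalizing a with
  | zero =>
    intro dp0 i' j'
    rw [PySem.List.pyRange_one_eq_nil (by omega), List.foldl_nil, if_neg (by omega)]
  | succ n ih =>
    intro dp0 i' j'
    have hab : a < b := by omega
    rw [PySem.List.pyRange_one_cons hab, List.foldl_cons, ih (a+1) (by omega)]
    simp only [tblGet]
    by_cases hc : a ≤ i' ∧ i' < b ∧ j' = i'
    · rw [if_pos hc]
      by_cases h2 : a + 1 ≤ i'
      · rw [if_pos ⟨h2, hc.2.1, hc.2.2⟩]
      · have hia : i' = a := by omega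
        have hja : j' = a := by omega
        subst hia; subst hja
        rw [if_neg (by omega), if_pos ⟨rfl, rfl⟩]
    · rw [if_neg hc, if_neg (by omega), if_neg (by
        rintro ⟨h1, h2⟩
        exact hc ⟨by omega, by omega, by omega⟩)]

-- a dp table is Good up to length L when it matches dpSpec on all stored intervals that long
def Good (h t : Int → Int) (hi : Int) (dp : List ((Int × Int) × (Int × Int × Int))) (L : Int) : Prop :=
  ∀ i j : Int, 0 ≤ i → i ≤ j → j ≤ hi → j - i + 1 ≤ L → tblGet dp i j = dpSpec h t i j

-- the inner (i-) fold of A at a fixed length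
theorem innerFold_good (h t : Int → Int) (hi len : Int) (hlen : 2 ≤ len) :
    ∀ (a : Int) (dp : List ((Int × Int) × (Int × Int × Int))), 0 ≤ a →
    Good h t hi dp (len - 1) →
    (∀ i : Int, 0 ≤ i → i < a → tblGet dp i (i + len - 1) = dpSpec h t i (i + len - 1)) →
    Good h t hi
      ((PySem.List.pyRange a (hi - len + 2) 1).foldl
        (fun dp i => ((i, i + len - 1), bestSplit (tblGet dp) i (i + len - 1)) :: dp) dp) len := by
  suffices key : ∀ (n : Nat) (a : Int), (hi - len + 2 - a).toNat = n →
      ∀ dp : List ((Int × Int) × (Int × Int × Int)), 0 ≤ a →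
      Good h t hi dp (len - 1) →
      (∀ i : Int, 0 ≤ i → i < a → tblGet dp i (i + len - 1) = dpSpec h t i (i + len - 1)) →
      Good h t hi
        ((PySem.List.pyRange a (hi - len + 2) 1).foldl
          (fun dp i => ((i, i + len - 1), bestSplit (tblGet dp) i (i + len - 1)) :: dp) dp) len by
    intro a dp ha h1 h2
    exact key _ a rfl dp ha h1 h2
  intro n
  induction n with
  | zero =>
    intro a hfuel dp ha hGood hDone
    rw [PySem.List.pyRange_one_eq_nil (by omega), List.foldl_nil]
    intro i j h0 hij hjhi hL
    rcases lt_or_ge (j - i + 1) len with hl | hl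
    · exact hGood i j h0 hij hjhi (by omega)
    · have hj : j = i + len - 1 := by omega
      rw [hj]
      exact hDone i h0 (by omega)
  | succ n ih =>
    intro a hfuel dp ha hGood hDone
    have hab : a < hi - len + 2 := by omega
    rw [PySem.List.pyRange_one_cons hab, List.foldl_cons]
    refine ih (a+1) (by omega) _ (by omega) ?good ?done
    case good =>
      intro i j h0 hij hjhi hL
      simp only [tblGet]
      split_ifs with hm
      · exfalso; omega
      · exact hGood i j h0 hij hjhi hL
    case done =>
      intro i h0 hia
      by_cases hi' : i = a
      · subst hi'
        simp only [tblGet]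
        rw [if_pos ⟨trivial, trivial⟩]
        have hlt : i < i + len - 1 := by omega
        have hm : (i + len - 1 - i).toNat = (len - 2).toNat + 1 := by omega
        unfold dpSpec
        rw [hm]
        simp only [dpF, if_pos hlt]
        refine bestSplit_congr _ _ _ _ (fun k hk1 hk2 => ?_)
        constructor
        · rw [hGood i k h0 hk1 (by omega) (by omega)]
          unfold dpSpec
          exact dpF_stable h t ((len - 2).toNat) ((k - i).toNat) i k le_rfl (by omega)
        · rw [hGood (k+1) (i + len - 1) (by omega) (by omega) (by omega) (by omega)]
          unfold dpSpec
          exact dpF_stable h t ((len - 2).toNat) ((i + len - 1 - (k+1)).toNat) (k+1)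
            (i + len - 1) le_rfl (by omega)
      · simp only [tblGet]
        rw [if_neg (by rintro ⟨rfl, -⟩; exact hi' rfl)]
        exact hDone i h0 (by omega)

theorem buildDP_eq (h t : Int → Int) (hi lenTop : Int) (i j : Int)
    (h0 : 0 ≤ i) (hij : i ≤ j) (hjhi : j ≤ hi) (hlen : j - i + 1 ≤ lenTop - 1) :
    tblGet (buildDP h t hi lenTop) i j = dpSpec h t i j := by
  have hGood1 : Good h t hi
      ((PySem.List.pyRange 0 (hi+1) 1).foldl
        (fun dp i => ((i, i), (0, h i, t i)) :: dp) []) 1 := by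
    intro i' j' h0' hij' hjhi' hL'
    have hj' : j' = i' := by omega
    subst hj'
    rw [initFold_eq h t 0 (hi+1) _ j' j', if_pos ⟨h0', by omega, rfl⟩, dpSpec_diag]
  have lenkey : ∀ (n : Nat),
      Good h t hi
        ((PySem.List.pyRange 2 ((n:Int)+2) 1).foldl (fun dp len =>
          (PySem.List.pyRange 0 (hi - len + 2) 1).foldl
            (fun dp i => ((i, i + len - 1), bestSplit (tblGet dp) i (i + len - 1)) :: dp) dp)
          ((PySem.List.pyRange 0 (hi+1) 1).foldl
            (fun dp i => ((i, i), (0, h i, t i)) :: dp) []))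
        ((n:Int)+1) := by
    intro n
    induction n with
    | zero =>
      have e0 : ((0:Nat):Int) + 2 = 2 := by norm_num
      have e0' : ((0:Nat):Int) + 1 = 1 := by norm_num
      rw [e0, e0', PySem.List.pyRange_one_eq_nil (le_refl 2), List.foldl_nil]
      exact hGood1
    | succ n ihn =>
      have e1 : ((n+1:Nat):Int) + 2 = ((n:Int) + 2) + 1 := by push_cast; ring
      have e3 : ((n+1:Nat):Int) + 1 = ((n:Int) + 2) := by push_cast; ring
      rw [e1, e3, PySem.List.pyRange_one_succ_right (a := 2) (b := (n:Int)+2) (by omega),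
        List.foldl_append, List.foldl_cons, List.foldl_nil]
      refine innerFold_good h t hi ((n:Int)+2) (by omega) 0 _ le_rfl ?_
        (fun i h0i hi0 => absurd hi0 (by omega))
      have e2 : ((n:Int)+2) - 1 = (n:Int) + 1 := by ring
      rw [e2]
      exact ihn
  have h2top : 2 ≤ lenTop := by omega
  have etop : lenTop = ((lenTop - 2).toNat : Int) + 2 := by omega
  unfold buildDP
  rw [etop]
  exact lenkey ((lenTop - 2).toNat) i j h0 hij hjhi (by omega)

-- the DP is invariant under shifting all positions by s (given matching heads/tails)
theorem dpF_shift (h1 t1 h2 t2 : Int → Int) (s : Int) :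
    ∀ fuel (i j : Int), i ≤ j →
    (∀ p, i ≤ p → p ≤ j → h1 p = h2 (s + p) ∧ t1 p = t2 (s + p)) →
    dpF h1 t1 fuel i j = dpF h2 t2 fuel (s + i) (s + j) := by
  intro fuel
  induction fuel with
  | zero =>
    intro i j hij hpt
    simp only [dpF]
    rw [(hpt i le_rfl hij).1, (hpt i le_rfl hij).2]
  | succ f ihf =>
    intro i j hij hpt
    by_cases hlt : i < j
    · have hlt2 : s + i < s + j := by omega
      simp only [dpF, if_pos hlt, if_pos hlt2]
      unfold bestSplit
      rw [PySem.List.pyRange_one i j, PySem.List.pyRange_one (s+i) (s+j)]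
      have er : s + j - (s + i) = j - i := by ring
      rw [er, List.foldl_map, List.foldl_map]
      refine PySem.List.foldl_congr_mem _ _ _ _ (fun acc k hk => ?_)
      rw [List.mem_range] at hk
      have hki : (k:Int) < j - i := by omega
      have e1 : dpF h1 t1 f i (i + (k:Int)) = dpF h2 t2 f (s + i) (s + (i + (k:Int))) :=
        ihf i (i + (k:Int)) (by omega) (fun p hp1 hp2 => hpt p hp1 (by omega))
      have e2 : dpF h1 t1 f (i + (k:Int) + 1) j = dpF h2 t2 f (s + (i + (k:Int) + 1)) (s + j) :=
        ihf (i + (k:Int) + 1) j (by omega) (fun p hp1 hp2 => hpt p (by omega) hp2)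
      have a1 : s + (i + (k:Int)) = s + i + (k:Int) := by ring
      have a2 : s + (i + (k:Int) + 1) = s + i + (k:Int) + 1 := by ring
      rw [a1] at e1
      rw [a2] at e2
      simp only [e1, e2]
    · have hlt2 : ¬ (s + i < s + j) := by omega
      simp only [dpF, if_neg hlt, if_neg hlt2]
      rw [(hpt i le_rfl hij).1, (hpt i le_rfl hij).2]

-- pointwise congruence (shift by 0)
theorem dpF_congr (h1 t1 h2 t2 : Int → Int) (fuel : Nat) (i j : Int) (hij : i ≤ j)
    (hpt : ∀ p, i ≤ p → p ≤ j → h1 p = h2 p ∧ t1 p = t2 p) :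
    dpF h1 t1 fuel i j = dpF h2 t2 fuel i j := by
  have := dpF_shift h1 t1 h2 t2 0 fuel i j hij (fun p hp1 hp2 => by
    simpa using hpt p hp1 hp2)
  simpa using this

-- head/tail agreement between A's rotation slice and the doubled array, on window s
theorem window_ht (heads : List Int) (N s : Int) (hlen : N ≤ (heads.length : Int))
    (hs0 : 0 ≤ s) (hsN : s < N) (p : Int) (hp0 : 0 ≤ p) (hpN : p ≤ N - 1) :
    PySem.List.pyGetD (PySem.List.slice (heads ++ heads) (some s) (some (s + N))) p 0
      = PySem.List.pyGetD (heads ++ heads) (s + p) 0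
  ∧ PySem.List.pyGetD (PySem.List.slice (heads ++ heads) (some s) (some (s + N)))
        (PySem.Int.mod (p+1) N) 0
      = (if s + p = s + N - 1 then PySem.List.pyGetD (heads ++ heads) s 0
         else PySem.List.pyGetD (heads ++ heads) (s + p + 1) 0) := by
  have hextlen : ((heads ++ heads).length : Int) = 2 * (heads.length : Int) := by
    rw [List.length_append]; push_cast; omega
  have hget : ∀ q : Int, 0 ≤ q → q < N →
      PySem.List.pyGetD (PySem.List.slice (heads ++ heads) (some s) (some (s + N))) q 0
        = PySem.List.pyGetD (heads ++ heads) (s + q) 0 := by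
    intro q hq0 hqN
    rw [PySem.List.slice_toNat (heads ++ heads) hs0 (by omega)]
    have hcl : (List.take ((s+N).toNat - s.toNat) (List.drop s.toNat (heads ++ heads))).length
        = N.toNat := by
      rw [List.length_take, List.length_drop, List.length_append]
      omega
    rw [PySem.List.pyGetD_eq_getElem _ 0 hq0 (by rw [hcl]; omega),
      PySem.List.pyGetD_eq_getElem _ 0 (by omega) (by omega)]
    rw [List.getElem_take, List.getElem_drop]
    congr 1
    omega
  refine ⟨hget p hp0 (by omega), ?_⟩
  have hNpos : 0 < N := by omega
  by_cases hpl : p = N - 1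
  · subst hpl
    have hm : PySem.Int.mod (N - 1 + 1) N = 0 := by
      rw [PySem.Int.mod_eq_emod_of_pos hNpos]
      simp
    rw [hm, hget 0 le_rfl hNpos, if_pos (by omega)]
    congr 1
    ring
  · have hm : PySem.Int.mod (p + 1) N = p + 1 := by
      rw [PySem.Int.mod_eq_emod_of_pos hNpos, Int.emod_eq_of_lt (by omega) (by omega)]
    rw [hm, hget (p+1) (by omega) (by omega), if_neg (by omega)]
    congr 1
    ring

-- ---- B-side lemmas ----

-- getD on a map over List.range
theorem getD_map_range {A : Type} (f : Nat → A) (M i : Nat) (hi : i < M) (d : A) :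
    ((List.range M).map f).getD i d = f i := by
  rw [List.getD_eq_getElem?_getD, List.getElem?_map, List.getElem?_range hi]
  rfl

-- pvB_best is the fuseVal-fold over its pair list
theorem pvB_best_eq_foldl (pairs : List ((Int × Int × Int) × (Int × Int × Int))) :
    pvB_best pairs = pairs.foldl (fun a p => fuseVal p.1 p.2 a) (0, 0, 0) := by
  unfold pvB_best
  suffices h : ∀ acc : Int × Int × Int,
      ((pairs.filterMap (fun p =>
        if p.1.2.2 = p.2.2.1 then
          some (p.1.1 + p.2.1 + p.1.2.1 * p.1.2.2 * p.2.2.2, p.1.2.1, p.2.2.2)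
        else none)).foldl (fun b c => if c.1 > b.1 then c else b) acc)
      = pairs.foldl (fun a p => fuseVal p.1 p.2 a) acc from h _
  induction pairs with
  | nil => intro acc; rfl
  | cons p ps ih =>
    intro acc
    rw [List.filterMap_cons]
    by_cases hc : p.1.2.2 = p.2.2.1
    · rw [if_pos hc]
      simp only [List.foldl_cons]
      rw [ih]
      congr 1
      simp [fuseVal, hc]
    · rw [if_neg hc]
      simp only [List.foldl_cons]
      rw [ih]
      congr 1
      simp [fuseVal, hc]

-- bestSplit phrased as pvB_best over the offset-indexed pair list
theorem bestSplit_as_pairs (dp : Int → Int → Int × Int × Int) (i j : Int) :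
    bestSplit dp i j
      = pvB_best ((List.range (j - i).toNat).map (fun t : Nat =>
          (dp i (i + (t : Int)), dp (i + (t : Int) + 1) j))) := by
  rw [pvB_best_eq_foldl, List.foldl_map]
  unfold bestSplit
  rw [PySem.List.pyRange_one i j, List.foldl_map]

-- the fully-built shared rows after processing offsets 1..D
def pvRows (h2 t2 : Int → Int) (M D : Nat) : List (List (Int × Int × Int)) :=
  (List.range M).map (fun i =>
    (List.range (min (D+1) (M - i))).map (fun d : Nat => dpSpec h2 t2 (i : Int) ((i : Int) + (d : Int))))

theorem pvRows_get (h2 t2 : Int → Int) (M D : Nat) (i d : Nat)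
    (hd : d ≤ D) (him : i + d < M) :
    pvB_getU (pvRows h2 t2 M D) i d = dpSpec h2 t2 (i : Int) ((i : Int) + (d : Int)) := by
  have hiM : i < M := by omega
  have hdm : d < min (D+1) (M - i) := by omega
  unfold pvB_getU pvRows
  rw [getD_map_range _ _ _ hiM, getD_map_range _ _ _ hdm]

-- the new cell appended at offset D+1 is the spec cell
theorem pvB_newcell (h2 t2 : Int → Int) (M D : Nat) (i : Nat) (hm : i + (D+1) < M) :
    pvB_best ((List.range (D+1)).map (fun t =>
        (pvB_getU (pvRows h2 t2 M D) i t, pvB_getU (pvRows h2 t2 M D) (i + t + 1) (D+1-1-t))))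
      = dpSpec h2 t2 (i : Int) ((i : Int) + ((D+1 : Nat) : Int)) := by
  have hfuel : (((i : Int) + ((D+1 : Nat) : Int)) - (i : Int)).toNat = D + 1 := by
    push_cast; omega
  have hlt : (i : Int) < (i : Int) + ((D+1 : Nat) : Int) := by push_cast; omega
  unfold dpSpec
  rw [hfuel]
  simp only [dpF, if_pos hlt]
  rw [bestSplit_as_pairs, hfuel]
  congr 1
  refine List.map_congr_left (fun t ht => ?_)
  rw [List.mem_range] at ht
  have e1 : pvB_getU (pvRows h2 t2 M D) i t
      = dpF h2 t2 D (i : Int) ((i : Int) + (t : Int)) := by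
    rw [pvRows_get h2 t2 M D i t (by omega) (by omega)]
    unfold dpSpec
    exact dpF_stable h2 t2 D (((i : Int) + (t : Int) - (i : Int)).toNat) _ _ le_rfl
      (by omega)
  have e2 : pvB_getU (pvRows h2 t2 M D) (i + t + 1) (D+1-1-t)
      = dpF h2 t2 D ((i : Int) + (t : Int) + 1) ((i : Int) + ((D+1 : Nat) : Int)) := by
    have hd : D + 1 - 1 - t = D - t := by omega
    rw [hd, pvRows_get h2 t2 M D (i + t + 1) (D - t) (by omega) (by omega)]
    unfold dpSpec
    have ecast : ((i + t + 1 : Nat) : Int) = (i : Int) + (t : Int) + 1 := by push_cast; ring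
    have ecast2 : ((i + t + 1 : Nat) : Int) + ((D - t : Nat) : Int)
        = (i : Int) + ((D+1 : Nat) : Int) := by push_cast; omega
    rw [ecast2, ecast]
    refine dpF_stable h2 t2 D _ _ _ le_rfl (by push_cast; omega)
  rw [e1, e2]

theorem pvRows_getElem (h2 t2 : Int → Int) (M D n : Nat)
    (hn : n < (pvRows h2 t2 M D).length) :
    (pvRows h2 t2 M D)[n]
      = (List.range (min (D+1) (M - n))).map
          (fun d : Nat => dpSpec h2 t2 (n : Int) ((n : Int) + (d : Int))) := by
  unfold pvRows at *
  simp only [List.getElem_map, List.getElem_range]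

theorem pvB_step_rows (h2 t2 : Int → Int) (M D : Nat) :
    pvB_step M (pvRows h2 t2 M D) (D+1) = pvRows h2 t2 M (D+1) := by
  unfold pvB_step
  apply List.ext_getElem
  · simp [pvRows]
  · intro n hn hn'
    have hnM : n < M := by
      simpa only [pvRows, List.length_map, List.length_range] using hn'
    rw [List.getElem_mapIdx]
    rw [pvRows_getElem h2 t2 M D n (by simpa [pvRows] using hnM),
      pvRows_getElem h2 t2 M (D+1) n hn']
    by_cases hc : n + (D+1) < M
    · rw [if_pos hc]
      have hmin1 : min (D+1) (M - n) = D+1 := by omega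
      have hmin2 : min (D+1+1) (M - n) = D+2 := by omega
      rw [hmin1, hmin2, pvB_newcell h2 t2 M D n hc,
        show List.range (D+2) = List.range (D+1) ++ [D+1] from List.range_succ,
        List.map_append, List.map_singleton]
    · rw [if_neg hc]
      have hmin : min (D+1+1) (M - n) = min (D+1) (M - n) := by omega
      rw [hmin]

theorem pvB_fold_rows (h2 t2 : Int → Int) (M : Nat) (K : Nat) :
    (List.range' 1 K).foldl (pvB_step M)
        ((List.range M).map (fun i : Nat => [((0 : Int), h2 (i : Int), t2 (i : Int))]))
      = pvRows h2 t2 M K := by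
  induction K with
  | zero =>
    rw [show List.range' 1 0 = ([] : List Nat) from rfl, List.foldl_nil]
    unfold pvRows
    refine List.map_congr_left (fun i hi => ?_)
    rw [List.mem_range] at hi
    have hmin : min (0+1) (M - i) = 1 := by omega
    rw [hmin, show List.range 1 = [0] from rfl, List.map_singleton]
    rw [show ((i : Int) + ((0 : Nat) : Int)) = (i : Int) by push_cast; ring, dpSpec_diag]
  | succ K ih =>
    rw [List.range'_concat, List.foldl_append, ih, List.foldl_cons, List.foldl_nil,
      show 1 + 1 * K = K + 1 by omega, pvB_step_rows]

-- the column: after n steps it is the window dp for intervals [e-n+q, e]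
theorem pvB_col_eq (h2 t2 hW tW : Int → Int) (M K : Nat) (s e : Nat)
    (hse : s ≤ e) (heM : e ≤ M) (heK : e ≤ s + K + 1)
    (hh : ∀ p : Int, (s : Int) ≤ p → p ≤ (e : Int) → hW p = h2 p)
    (ht : ∀ p : Int, (s : Int) ≤ p → p < (e : Int) → tW p = t2 p)
    (c0 : Int × Int × Int) (hc0 : c0 = (0, hW (e : Int), tW (e : Int))) :
    ∀ n : Nat, n ≤ e - s →
    pvB_col (pvRows h2 t2 M K) e c0 n
      = (List.range (n+1)).map (fun q : Nat => dpSpec hW tW ((e - n + q : Nat) : Int) (e : Int)) := by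
  intro n
  induction n with
  | zero =>
    intro _
    rw [show pvB_col (pvRows h2 t2 M K) e c0 0 = [c0] from rfl,
      show List.range (0+1) = [0] from rfl, List.map_singleton,
      show e - 0 + 0 = e by omega, dpSpec_diag, hc0]
  | succ n ih =>
    intro hn
    have hcol := ih (by omega)
    show pvB_best ((List.range (n+1)).map (fun t =>
        (pvB_getU (pvRows h2 t2 M K) (e - (n+1)) t,
         (pvB_col (pvRows h2 t2 M K) e c0 n).getD t (0, 0, 0)))) :: pvB_col (pvRows h2 t2 M K) e c0 n
      = _
    rw [hcol]
    have hE : ((e - (n+1) : Nat) : Int) = (e : Int) - ((n : Int) + 1) := by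
      push_cast [Nat.cast_sub (show n+1 ≤ e by omega)]; ring
    have hE2 : ∀ q : Nat, ((e - n + q : Nat) : Int) = (e : Int) - (n : Int) + (q : Int) := by
      intro q; push_cast [Nat.cast_sub (show n ≤ e by omega)]; ring
    have hfuel : (((e : Nat) : Int) - ((e - (n+1) : Nat) : Int)).toNat = n + 1 := by
      rw [hE]; omega
    have head : pvB_best ((List.range (n+1)).map (fun t =>
        (pvB_getU (pvRows h2 t2 M K) (e - (n+1)) t,
         ((List.range (n+1)).map (fun q : Nat =>
            dpSpec hW tW ((e - n + q : Nat) : Int) (e : Int))).getD t (0, 0, 0))))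
        = dpSpec hW tW ((e - (n+1) : Nat) : Int) (e : Int) := by
      unfold dpSpec
      rw [hfuel]
      have hlt : ((e - (n+1) : Nat) : Int) < (e : Int) := by rw [hE]; omega
      simp only [dpF, if_pos hlt]
      rw [bestSplit_as_pairs, hfuel]
      congr 1
      refine List.map_congr_left (fun t htm => ?_)
      rw [List.mem_range] at htm
      have e1 : pvB_getU (pvRows h2 t2 M K) (e - (n+1)) t
          = dpF hW tW n ((e - (n+1) : Nat) : Int) (((e - (n+1) : Nat) : Int) + (t : Int)) := by
        rw [pvRows_get h2 t2 M K (e - (n+1)) t (by omega) (by omega)]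
        have hcc : dpSpec h2 t2 ((e - (n+1) : Nat) : Int) (((e - (n+1) : Nat) : Int) + (t : Int))
            = dpSpec hW tW ((e - (n+1) : Nat) : Int) (((e - (n+1) : Nat) : Int) + (t : Int)) := by
          unfold dpSpec
          refine (dpF_congr hW tW h2 t2 _ _ _ (by omega) (fun p hp1 hp2 => ?_)).symm
          have hps : (s : Int) ≤ p := by rw [hE] at hp1; omega
          have hpe : p < (e : Int) := by rw [hE] at hp2; omega
          exact ⟨hh p hps (by omega), ht p hps hpe⟩
        rw [hcc]
        unfold dpSpec
        exact dpF_stable hW tW n _ _ _ le_rfl (by omega)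
      have e2 : ((List.range (n+1)).map (fun q : Nat =>
            dpF hW tW ((((e : Nat) : Int) - ((e - n + q : Nat) : Int)).toNat)
              ((e - n + q : Nat) : Int) ((e : Nat) : Int))).getD t (0, 0, 0)
          = dpF hW tW n (((e - (n+1) : Nat) : Int) + (t : Int) + 1) ((e : Nat) : Int) := by
        rw [getD_map_range _ _ _ htm]
        have ecast : ((e - n + t : Nat) : Int) = ((e - (n+1) : Nat) : Int) + (t : Int) + 1 := by
          rw [hE2, hE]; ring
        rw [ecast]
        exact dpF_stable hW tW n _ _ _ le_rfl (by rw [hE]; omega)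
      rw [e1, e2]
    rw [head]
    rw [show List.range (n+1+1) = 0 :: (List.range (n+1)).map Nat.succ from List.range_succ_eq_map,
      List.map_cons, List.map_map]
    congr 1
    refine List.map_congr_left (fun q hq => ?_)
    simp only [Function.comp]
    rw [show e - (n+1) + Nat.succ q = e - n + q by omega]

-- ===== VERDICT (by name: the statement is the Claim_ definition above) =====
theorem solve_slime_fusion_spec : Claim_equal_solve_slime_fusion := by
  intro N heads _ hpre
  unfold Pre_solve_slime_fusion at hpre
  unfold Spec_solve_slime_fusion
  by_cases hN0 : N ≤ 0
  · simp only [solve_slime_fusion, solve_slime_fusion_alt, if_pos hN0]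
    rw [PySem.List.pyRange_one_eq_nil (by omega), List.foldl_nil]
  · have hL : N ≤ (heads.length : Int) := by
      rcases hpre with h | h
      · exact h
      · omega
    have hN1 : 1 ≤ N := by omega
    simp only [solve_slime_fusion, solve_slime_fusion_alt, if_neg hN0]
    have hU := pvB_fold_rows (fun q => PySem.List.pyGetD (heads ++ heads) q 0)
      (fun q => PySem.List.pyGetD (heads ++ heads) (q+1) 0) (2 * N.toNat - 1) (N.toNat - 2)
    beta_reduce at hU
    rw [hU, PySem.List.pyRange_one 0 N, List.foldl_map,
      show (N - 0).toNat = N.toNat by omega]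
    refine PySem.List.foldl_congr_mem _ _ _ _ (fun acc s hs => ?_)
    rw [List.mem_range] at hs
    simp only [zero_add]
    have heC : ((s + N.toNat - 1 : Nat) : Int) = (s : Int) + N - 1 := by omega
    -- B's column gives the window dp value
    have hcol := pvB_col_eq (fun q => PySem.List.pyGetD (heads ++ heads) q 0)
      (fun q => PySem.List.pyGetD (heads ++ heads) (q+1) 0)
      (fun q => PySem.List.pyGetD (heads ++ heads) q 0)
      (fun q => if q = (s : Int) + N - 1 then PySem.List.pyGetD (heads ++ heads) (s : Int) 0
        else PySem.List.pyGetD (heads ++ heads) (q+1) 0)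
      (2 * N.toNat - 1) (N.toNat - 2) s (s + N.toNat - 1)
      (by omega) (by omega) (by omega)
      (fun p _ _ => rfl)
      (fun p hp1 hp2 => if_neg (by rw [heC] at hp2; omega))
      (0, PySem.List.pyGetD (heads ++ heads) ((s + N.toNat - 1 : Nat) : Int) 0,
        PySem.List.pyGetD (heads ++ heads) (s : Int) 0)
      (by beta_reduce; rw [if_pos heC])
      (s + N.toNat - 1 - s) le_rfl
    rw [hcol, getD_map_range _ _ _ (by omega : 0 < s + N.toNat - 1 - s + 1),
      show s + N.toNat - 1 - (s + N.toNat - 1 - s) + 0 = s by omega]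
    -- A's window dp equals the same spec, by the shift through the slice
    rw [buildDP_eq _ _ (N - 1) (N + 1) 0 (N - 1) le_rfl (by omega) (by omega) (by omega)]
    have hshift : dpSpec
        (fun i => PySem.List.pyGetD
          (PySem.List.slice (heads ++ heads) (some (s : Int)) (some ((s : Int) + N))) i 0)
        (fun i => PySem.List.pyGetD
          (PySem.List.slice (heads ++ heads) (some (s : Int)) (some ((s : Int) + N)))
          (PySem.Int.mod (i+1) N) 0) 0 (N - 1)
      = dpSpec (fun q => PySem.List.pyGetD (heads ++ heads) q 0)
          (fun q => if q = (s : Int) + N - 1 then PySem.List.pyGetD (heads ++ heads) (s : Int) 0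
            else PySem.List.pyGetD (heads ++ heads) (q+1) 0) (s : Int) ((s : Int) + N - 1) := by
      unfold dpSpec
      have hfuel : (N - 1 - 0).toNat = ((s : Int) + N - 1 - (s : Int)).toNat := by omega
      rw [hfuel]
      have := dpF_shift
        (fun i => PySem.List.pyGetD
          (PySem.List.slice (heads ++ heads) (some (s : Int)) (some ((s : Int) + N))) i 0)
        (fun i => PySem.List.pyGetD
          (PySem.List.slice (heads ++ heads) (some (s : Int)) (some ((s : Int) + N)))
          (PySem.Int.mod (i+1) N) 0)
        (fun q => PySem.List.pyGetD (heads ++ heads) q 0)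
        (fun q => if q = (s : Int) + N - 1 then PySem.List.pyGetD (heads ++ heads) (s : Int) 0
          else PySem.List.pyGetD (heads ++ heads) (q+1) 0)
        (s : Int) (((s : Int) + N - 1 - (s : Int)).toNat) 0 (N - 1) (by omega)
        (fun p hp1 hp2 => window_ht heads N (s : Int) hL (by omega) (by omega) p hp1 hp2)
      rw [this]
      congr 1
      omega
    rw [hshift, heC]
    by_cases hgt : (dpSpec (fun q => PySem.List.pyGetD (heads ++ heads) q 0)
        (fun q => if q = (s : Int) + N - 1 then PySem.List.pyGetD (heads ++ heads) (s : Int) 0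
          else PySem.List.pyGetD (heads ++ heads) (q+1) 0) (s : Int) ((s : Int) + N - 1)).1 > acc
    · rw [if_pos hgt, max_eq_right (le_of_lt hgt)]
    · rw [if_neg hgt, max_eq_left (by omega)]
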